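-- pv_equiv track=rewrite | github.com/hillaryychan/iccsh | src/ch7/ciphers.py | alpha_enumerate
-- ===== SOURCE A (Python) =====
-- def alpha_enumerate(message):
--     """
--     Enumerate only alphabetical chars
--     """
--     enumerated = []
--     num = 0
--     for c in message:
--         if c.isalpha():
--             enumerated.append((num, c))
--             num += 1
--         else:
--             enumerated.append((-1, c))
--     return enumerated
-- ===== SOURCE B (Python) =====
-- def alpha_enumerate(message):
--     """
--     Enumerate only alphabetical chars
--     (two-pass: build a position->rank table, then emit by lookup)
--     """
--     alpha_positions = [i for i, c in enumerate(message) if c.isalpha()]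
--     ranks = {p: k for k, p in enumerate(alpha_positions)}
--     return [(ranks.get(i, -1), c) for i, c in enumerate(message)]
-- ===== Notes on version B (the rewrite author's own statement) =====
-- stated objective: alternative
-- what changed: Replaces the single stateful-counter pass with a two-pass structure: first collect the positions of alphabetical characters and build a position-to-rank dict, then map over the enumerated message looking each position up (default -1).
import Mathlib
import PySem

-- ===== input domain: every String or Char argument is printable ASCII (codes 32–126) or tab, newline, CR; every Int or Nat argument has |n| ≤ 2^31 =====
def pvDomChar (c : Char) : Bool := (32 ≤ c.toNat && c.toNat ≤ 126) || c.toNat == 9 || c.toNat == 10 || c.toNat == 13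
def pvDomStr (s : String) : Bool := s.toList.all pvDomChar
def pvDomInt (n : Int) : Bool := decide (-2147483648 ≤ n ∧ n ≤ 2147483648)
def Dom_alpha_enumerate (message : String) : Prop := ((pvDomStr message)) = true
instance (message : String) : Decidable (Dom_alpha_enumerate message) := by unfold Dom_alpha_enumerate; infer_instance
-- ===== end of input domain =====

-- B replaces A's single stateful-counter pass by a build-table-then-lookup two-pass structure (same return value; no speed claim).


-- ===== PORT A =====
-- A: one pass, appending (num, c) for alphabetic c (incrementing num) and (-1, c) otherwise.
def alpha_enumerate (message : String) : List (Int × String) :=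
  (message.toList.foldl
    (fun (st : List (Int × String) × Int) c =>
      if PySem.Chars.isalpha c then (st.1 ++ [(st.2, String.ofList [c])], st.2 + 1)
      else (st.1 ++ [((-1 : Int), String.ofList [c])], st.2))
    ([], 0)).1

-- ===== PORT B =====
-- B: positions of alphabetic chars, a position->rank dict, then a lookup pass.
def alpha_enumerate_alt (message : String) : List (Int × String) :=
  let cs := message.toList
  let alphaPositions : List Int :=
    ((PySem.List.enumerate cs 0).filter (fun ic => PySem.Chars.isalpha ic.2)).map (·.1)
  let ranks : PySem.Dict Int Int :=
    (PySem.List.enumerate alphaPositions 0).foldl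
      (fun d kp => d.insert kp.2 kp.1) PySem.Dict.empty
  (PySem.List.enumerate cs 0).map (fun ic => (ranks.getD ic.1 (-1), String.ofList [ic.2]))

-- ===== PRECONDITION & SPEC =====
def Spec_alpha_enumerate (message : String) (out : List (Int × String)) : Prop := out = alpha_enumerate_alt message
instance (message : String) (out : List (Int × String)) : Decidable (Spec_alpha_enumerate message out) := by unfold Spec_alpha_enumerate; infer_instance

-- ===== CLAIM (what is proved, stated in full; the proofs are below) =====
def Claim_equal_alpha_enumerate : Prop := ∀ (message : String), Dom_alpha_enumerate message → Spec_alpha_enumerate message (alpha_enumerate message)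

-- ===== LEMMAS AND PROOFS =====

-- Canonical recursive form of A's loop.
def goA : List Char → Int → List (Int × String)
  | [], _ => []
  | c :: cs, n =>
    if PySem.Chars.isalpha c then (n, String.ofList [c]) :: goA cs (n + 1)
    else ((-1 : Int), String.ofList [c]) :: goA cs n

lemma foldA_eq_goA (cs : List Char) (acc : List (Int × String)) (n : Int) :
    (cs.foldl
      (fun (st : List (Int × String) × Int) c =>
        if PySem.Chars.isalpha c then (st.1 ++ [(st.2, String.ofList [c])], st.2 + 1)
        else (st.1 ++ [((-1 : Int), String.ofList [c])], st.2))
      (acc, n)).1 = acc ++ goA cs n := by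
  induction cs generalizing acc n with
  | nil => simp [goA]
  | cons c cs ih =>
    by_cases h : PySem.Chars.isalpha c = true <;> simp [goA, h, ih]

-- Positions (from start index s) of the alphabetic characters.
def posL (cs : List Char) (s : Int) : List Int :=
  ((PySem.List.enumerate cs s).filter (fun ic => PySem.Chars.isalpha ic.2)).map (·.1)

lemma posL_nil (s : Int) : posL [] s = [] := by simp [posL, PySem.List.enumerate_nil]

lemma posL_cons (c : Char) (cs : List Char) (s : Int) :
    posL (c :: cs) s =
      if PySem.Chars.isalpha c then s :: posL cs (s + 1) else posL cs (s + 1) := by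
  by_cases h : PySem.Chars.isalpha c = true <;>
    simp [posL, PySem.List.enumerate_cons, h]

lemma posL_ge (cs : List Char) (s : Int) : ∀ i ∈ posL cs s, s ≤ i := by
  induction cs generalizing s with
  | nil => simp [posL_nil]
  | cons c cs ih =>
    intro i hi
    rw [posL_cons] at hi
    by_cases h : PySem.Chars.isalpha c = true
    · rw [if_pos h] at hi
      rcases List.mem_cons.1 hi with rfl | hi
      · exact le_refl _
      · have := ih (s + 1) i hi; omega
    · rw [if_neg h] at hi
      have := ih (s + 1) i hi; omega

lemma posL_nodup (cs : List Char) (s : Int) : (posL cs s).Nodup := by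
  induction cs generalizing s with
  | nil => simp [posL_nil]
  | cons c cs ih =>
    rw [posL_cons]
    by_cases h : PySem.Chars.isalpha c = true
    · rw [if_pos h]
      refine List.nodup_cons.2 ⟨fun hmem => ?_, ih (s + 1)⟩
      have := posL_ge cs (s + 1) s hmem; omega
    · rw [if_neg h]; exact ih (s + 1)

-- Rank of i in the position table ps, with rank offset r; -1 if absent.
def rankOf (r : Int) (ps : List Int) (i : Int) : Int :=
  match PySem.List.index? ps i with
  | some k => r + (k : Int)
  | none => -1

-- Looking up the dict built by B's fold is rankOf (over nodup keys).
lemma getD_build (ps : List Int) (hnd : ps.Nodup) (r : Int) (d : PySem.Dict Int Int) (i : Int) :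
    ((PySem.List.enumerate ps r).foldl (fun d kp => d.insert kp.2 kp.1) d).getD i (-1)
      = match PySem.List.index? ps i with
        | some k => r + (k : Int)
        | none => d.getD i (-1) := by
  induction ps generalizing r d with
  | nil =>
    rw [PySem.List.enumerate_nil, List.foldl_nil,
      (PySem.List.index?_eq_none_iff ([] : List Int) i).2 (List.not_mem_nil)]
  | cons p ps ih =>
    have hnd' : ps.Nodup := (List.nodup_cons.1 hnd).2
    rw [PySem.List.enumerate_cons, List.foldl_cons]
    rw [ih hnd' (r + 1) (d.insert (r, p).2 (r, p).1)]
    by_cases hip : i = p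
    · subst hip
      have hni : i ∉ ps := (List.nodup_cons.1 hnd).1
      rw [PySem.List.index?_cons_self i ps, (PySem.List.index?_eq_none_iff ps i).2 hni,
        PySem.Dict.getD_insert]
      simp
    · rw [PySem.List.index?_cons_of_ne ps (fun h => hip h.symm)]
      cases PySem.List.index? ps i with
      | none => simp only [Option.map_none]; rw [PySem.Dict.getD_insert]; simp [hip]
      | some k => simp only [Option.map_some]; push_cast; ring

-- Main lemma: B's lookup pass equals A's counter recursion, generalized over
-- the start position s and the rank offset r.
lemma mainB (cs : List Char) (s r : Int) :
    (PySem.List.enumerate cs s).map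
      (fun ic => (rankOf r (posL cs s) ic.1, String.ofList [ic.2])) = goA cs r := by
  induction cs generalizing s r with
  | nil => simp [PySem.List.enumerate_nil, goA]
  | cons c cs ih =>
    rw [PySem.List.enumerate_cons, List.map_cons, posL_cons]
    have htail : ∀ ic ∈ PySem.List.enumerate cs (s + 1), s + 1 ≤ ic.1 := by
      intro ic hic
      rcases (PySem.List.mem_enumerate_iff cs (s + 1) ic).1 hic with ⟨k, hk, rfl⟩
      simp
    by_cases h : PySem.Chars.isalpha c = true
    · rw [if_pos h]
      have hhead : rankOf r (s :: posL cs (s + 1)) s = r := by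
        rw [rankOf, PySem.List.index?_cons_self s (posL cs (s + 1))]
        simp
      have hmap : (PySem.List.enumerate cs (s + 1)).map
          (fun ic => (rankOf r (s :: posL cs (s + 1)) ic.1, String.ofList [ic.2]))
          = (PySem.List.enumerate cs (s + 1)).map
          (fun ic => (rankOf (r + 1) (posL cs (s + 1)) ic.1, String.ofList [ic.2])) := by
        refine List.map_congr_left (fun ic hic => ?_)
        have hne : s ≠ ic.1 := by have := htail ic hic; omega
        rw [rankOf, rankOf, PySem.List.index?_cons_of_ne (posL cs (s + 1)) hne]
        cases PySem.List.index? (posL cs (s + 1)) ic.1 with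
        | none => simp
        | some k => simp only [Option.map_some]; simp [Prod.ext_iff]; omega
      show ((rankOf r (s :: posL cs (s + 1)) s, String.ofList [c]) :: _) = _
      rw [hhead, hmap, ih (s + 1) (r + 1), goA, if_pos h]
    · rw [if_neg h]
      have hhead : rankOf r (posL cs (s + 1)) s = -1 := by
        rw [rankOf, (PySem.List.index?_eq_none_iff (posL cs (s + 1)) s).2
          (fun hmem => by have := posL_ge cs (s + 1) s hmem; omega)]
      rw [hhead, ih (s + 1) r, goA, if_neg h]

-- ===== VERDICT (by name: the statement is the Claim_ definition above) =====
theorem alpha_enumerate_spec : Claim_equal_alpha_enumerate := by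
  intro message _
  unfold Spec_alpha_enumerate alpha_enumerate alpha_enumerate_alt
  rw [foldA_eq_goA, List.nil_append]
  show goA message.toList 0
      = (PySem.List.enumerate message.toList 0).map
          (fun ic =>
            (((PySem.List.enumerate (posL message.toList 0) 0).foldl
                (fun d kp => d.insert kp.2 kp.1) PySem.Dict.empty).getD ic.1 (-1),
             String.ofList [ic.2]))
  have hmap : (PySem.List.enumerate message.toList 0).map
      (fun ic =>
        (((PySem.List.enumerate (posL message.toList 0) 0).foldl
            (fun d kp => d.insert kp.2 kp.1) PySem.Dict.empty).getD ic.1 (-1),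
         String.ofList [ic.2]))
      = (PySem.List.enumerate message.toList 0).map
          (fun ic => (rankOf 0 (posL message.toList 0) ic.1, String.ofList [ic.2])) := by
    refine List.map_congr_left (fun ic _ => ?_)
    rw [getD_build (posL message.toList 0) (posL_nodup message.toList 0) 0 PySem.Dict.empty ic.1,
      rankOf]
    cases PySem.List.index? (posL message.toList 0) ic.1 with
    | none => simp [PySem.Dict.getD_empty]
    | some k => rfl
  rw [hmap, mainB message.toList 0 0]
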